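-- pv_equiv track=rewrite | github.com/jguida941/voiceterm | dev/scripts/checks/check_structural_similarity.py | _count_cross_file_similar_pairs
-- ===== SOURCE A (Python) =====
-- def _count_cross_file_similar_pairs(
--     all_fingerprints: list[dict],
-- ) -> int:
--     """Count function pairs across different files with matching structural hashes."""
--     by_hash: dict[str, list[dict]] = {}
--     for fp in all_fingerprints:
--         by_hash.setdefault(fp["hash"], []).append(fp)
--     count = 0
--     for group in by_hash.values():
--         paths = {fp["path"] for fp in group}
--         if len(paths) > 1:
--             count += len(group) - 1
--     return count
-- ===== SOURCE B (Python) =====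
-- def _count_cross_file_similar_pairs(
--     all_fingerprints: list[dict],
-- ) -> int:
--     """Sort a copy by hash, then count within contiguous equal-hash runs in one scan."""
--     fps = sorted(all_fingerprints, key=lambda fp: fp["hash"])
--     count = 0
--     i = 0
--     n = len(fps)
--     while i < n:
--         h = fps[i]["hash"]
--         paths = {fps[i]["path"]}
--         j = i + 1
--         while j < n and fps[j]["hash"] == h:
--             paths.add(fps[j]["path"])
--             j += 1
--         if len(paths) > 1:
--             count += (j - i) - 1
--         i = j
--     return count
-- ===== Notes on version B (the rewrite author's own statement) =====
-- stated objective: alternative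
-- what changed: Replaces A's dict-of-groups (hash -> list of fingerprints, then a second pass over the groups) with sorting a copy by hash and counting within contiguous equal-hash runs in a single scan, with no grouping structure built.
import Mathlib
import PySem

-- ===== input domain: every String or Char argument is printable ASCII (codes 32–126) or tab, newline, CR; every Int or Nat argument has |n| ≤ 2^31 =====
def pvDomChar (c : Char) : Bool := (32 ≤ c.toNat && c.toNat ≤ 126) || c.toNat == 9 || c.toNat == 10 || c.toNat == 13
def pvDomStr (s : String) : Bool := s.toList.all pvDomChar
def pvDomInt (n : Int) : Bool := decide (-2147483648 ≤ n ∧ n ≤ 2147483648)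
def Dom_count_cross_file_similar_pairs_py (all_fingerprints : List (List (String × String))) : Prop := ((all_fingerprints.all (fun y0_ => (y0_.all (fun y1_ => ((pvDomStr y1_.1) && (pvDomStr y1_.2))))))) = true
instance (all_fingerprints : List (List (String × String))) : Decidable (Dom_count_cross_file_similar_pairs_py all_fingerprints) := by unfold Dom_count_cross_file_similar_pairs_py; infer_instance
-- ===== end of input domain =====

-- B replaces A's dict-of-groups (group by hash, then a second pass over the groups) by
-- sorting a copy by hash and counting inside contiguous equal-hash runs in one scan
-- (objective: alternative; no asymptotic speed claim).

-- ===== PORT A =====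
-- fp["hash"] / fp["path"]: first-match lookup; total via getD "" — Pre_ guarantees the key is present
def pvHash (fp : List (String × String)) : String := ((PySem.Dict.mk fp).get? "hash").getD ""
def pvPath (fp : List (String × String)) : String := ((PySem.Dict.mk fp).get? "path").getD ""

def count_cross_file_similar_pairs_py (all_fingerprints : List (List (String × String))) : Int :=
  -- by_hash.setdefault(fp["hash"], []).append(fp)  =  d[h] = d.get(h, []) + [fp]  = Dict.modify
  let by_hash : PySem.Dict String (List (List (String × String))) :=
    all_fingerprints.foldl (fun d fp => d.modify (pvHash fp) [] (fun g => g ++ [fp])) PySem.Dict.empty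
  by_hash.values.foldl (fun count group =>
    let paths := PySem.Set.ofList (group.map pvPath)
    if 1 < paths.length then count + ((group.length : Int) - 1) else count) 0

-- ===== PORT B =====
-- the nested while loops of Source B: the inner while collects the contiguous run of the
-- current hash (takeWhile) and its distinct paths; the outer loop resumes at j (dropWhile)
def pvScan : List (List (String × String)) → Int
  | [] => 0
  | fp :: rest =>
    let run := fp :: rest.takeWhile (fun x => pvHash x == pvHash fp)
    let paths := PySem.Set.ofList (run.map pvPath)
    (if 1 < paths.length then (run.length : Int) - 1 else 0) +
      pvScan (rest.dropWhile (fun x => pvHash x == pvHash fp))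
termination_by l => l.length
decreasing_by
  simp only [List.length_cons]
  exact Nat.lt_succ_of_le (List.length_dropWhile_le _ _)

def count_cross_file_similar_pairs_py_alt (all_fingerprints : List (List (String × String))) : Int :=
  pvScan (PySem.List.sorted all_fingerprints pvHash)

-- ===== PRECONDITION & SPEC =====
-- Pre_ excludes exactly the inputs where some fingerprint lacks a "hash" or "path" key,
-- on which A (and B) raise KeyError.
def Pre_count_cross_file_similar_pairs_py (all_fingerprints : List (List (String × String))) : Prop :=
  (all_fingerprints.all (fun fp =>
    ((PySem.Dict.mk fp).get? "hash").isSome && ((PySem.Dict.mk fp).get? "path").isSome)) = true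
instance (all_fingerprints : List (List (String × String))) : Decidable (Pre_count_cross_file_similar_pairs_py all_fingerprints) := by unfold Pre_count_cross_file_similar_pairs_py; infer_instance

def pvWitness_count_cross_file_similar_pairs_py : (List (List (String × String))) :=
  [[("hash", "h1"), ("path", "a.py")], [("hash", "h1"), ("path", "b.py")], [("hash", "h2"), ("path", "a.py")]]

def Spec_count_cross_file_similar_pairs_py (all_fingerprints : List (List (String × String))) (out : Int) : Prop := out = count_cross_file_similar_pairs_py_alt all_fingerprints
instance (all_fingerprints : List (List (String × String))) (out : Int) : Decidable (Spec_count_cross_file_similar_pairs_py all_fingerprints out) := by unfold Spec_count_cross_file_similar_pairs_py; infer_instance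

-- ===== CLAIM (what is proved, stated in full; the proofs are below) =====
def Claim_equal_count_cross_file_similar_pairs_py : Prop := ∀ (all_fingerprints : List (List (String × String))), Dom_count_cross_file_similar_pairs_py all_fingerprints → Pre_count_cross_file_similar_pairs_py all_fingerprints → Spec_count_cross_file_similar_pairs_py all_fingerprints (count_cross_file_similar_pairs_py all_fingerprints)

-- ===== LEMMAS AND PROOFS =====

-- contribution of one hash-group, and the reference sum over a list of hashes
def pvW (g : List (List (String × String))) : Int :=
  if 1 < (PySem.Set.ofList (g.map pvPath)).length then (g.length : Int) - 1 else 0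

def pvR (hs : List String) (L : List (List (String × String))) : Int :=
  (hs.map (fun h => pvW (L.filter (fun fp => pvHash fp == h)))).sum

theorem pvW_perm {g g' : List (List (String × String))} (h : g.Perm g') : pvW g = pvW g' := by
  have hm : (g.map pvPath).Perm (g'.map pvPath) := h.map pvPath
  have hs : (PySem.Set.ofList (g.map pvPath)).Perm (PySem.Set.ofList (g'.map pvPath)) := by
    rw [List.perm_ext_iff_of_nodup (PySem.Set.nodup_ofList _) (PySem.Set.nodup_ofList _)]
    intro a
    simp only [PySem.Set.mem_ofList]
    exact hm.mem_iff
  simp only [pvW, hs.length_eq, h.length_eq]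

theorem pvFoldCount (gs : List (List (List (String × String)))) (c : Int) :
    gs.foldl (fun count group =>
      let paths := PySem.Set.ofList (group.map pvPath)
      if 1 < paths.length then count + ((group.length : Int) - 1) else count) c
    = c + (gs.map pvW).sum := by
  have hstep : (fun (count : Int) (group : List (List (String × String))) =>
      let paths := PySem.Set.ofList (group.map pvPath)
      if 1 < paths.length then count + ((group.length : Int) - 1) else count)
      = fun count group => count + pvW group := by
    funext count group
    simp only [pvW]
    split <;> simp
  rw [hstep, PySem.List.foldl_add]

theorem pvA_eq (L : List (List (String × String))) :
    count_cross_file_similar_pairs_py L = pvR (PySem.Set.ofList (L.map pvHash)) L := by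
  unfold count_cross_file_similar_pairs_py
  set D := L.foldl (fun d fp => d.modify (pvHash fp) [] (fun g => g ++ [fp])) PySem.Dict.empty with hD
  have hkeys : D.keys = PySem.Set.ofList (L.map pvHash) := by
    rw [hD, PySem.Dict.keys_foldl_modify_key L pvHash [] (fun _ fp g => g ++ [fp]) PySem.Dict.empty,
      PySem.Dict.keys_empty, PySem.Set.update_nil_left]
  have hnodup : D.keys.Nodup := by
    rw [hD]
    exact PySem.Dict.nodup_keys_foldl_modify_key L pvHash [] (fun _ fp g => g ++ [fp])
      PySem.Dict.empty (by simp [PySem.Dict.keys_empty])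
  have hgetD : ∀ c, D.getD c [] = L.filter (fun fp => pvHash fp == c) := by
    intro c
    have hmap : D = (L.map (fun fp => (pvHash fp, fp))).foldl
        (fun d p => d.modify p.1 [] (fun g => g ++ [p.2])) PySem.Dict.empty := by
      rw [hD, List.foldl_map]
    rw [hmap, PySem.Dict.getD_foldl_modify_append, PySem.Dict.getD_empty]
    simp [List.filter_map, List.map_map, Function.comp_def]
  show (D.values.foldl (fun count group =>
      let paths := PySem.Set.ofList (group.map pvPath)
      if 1 < paths.length then count + ((group.length : Int) - 1) else count) 0)
    = pvR (PySem.Set.ofList (L.map pvHash)) L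
  rw [PySem.Dict.values_eq_map_keys D hnodup [], pvFoldCount, hkeys]
  simp only [pvR, List.map_map, Function.comp_def, zero_add]
  congr 1
  exact List.map_congr_left (fun h _ => by rw [hgetD h])

theorem pvScan_eq (M : List (List (String × String))) :
    M.Pairwise (fun a b => pvHash a ≤ pvHash b) →
    pvScan M = pvR (PySem.Set.ofList (M.map pvHash)) M := by
  induction M using pvScan.induct with
  | case1 => intro _; simp [pvScan, pvR]
  | case2 fp rest ih =>
    intro hp
    have hrest : rest.Pairwise (fun a b => pvHash a ≤ pvHash b) := (List.pairwise_cons.mp hp).2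
    have hhead : ∀ x ∈ rest, pvHash fp ≤ pvHash x := (List.pairwise_cons.mp hp).1
    set p := fun x => pvHash x == pvHash fp with hpdef
    have ht : ∀ x ∈ rest.takeWhile p, pvHash x = pvHash fp := by
      intro x hx
      have := List.mem_takeWhile_imp hx
      simpa [hpdef] using this
    have hdropPW : (rest.dropWhile p).Pairwise (fun a b => pvHash a ≤ pvHash b) :=
      List.Pairwise.sublist (List.dropWhile_sublist p) hrest
    have hr : ∀ x ∈ rest.dropWhile p, pvHash fp < pvHash x := by
      intro x hx
      rcases hdrop : rest.dropWhile p with _ | ⟨y, r2⟩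
      · rw [hdrop] at hx; simp at hx
      · have hy : p y = false := by
          have := List.head_dropWhile_not p (l := rest) (by simp [hdrop])
          simpa [hdrop] using this
        have hyne : pvHash y ≠ pvHash fp := by simpa [hpdef] using hy
        have hymem : y ∈ rest := (List.dropWhile_sublist p).mem (by rw [hdrop]; exact List.mem_cons_self ..)
        have hylt : pvHash fp < pvHash y := lt_of_le_of_ne (hhead y hymem) (Ne.symm hyne)
        rw [hdrop] at hx
        rcases List.mem_cons.mp hx with rfl | hx2
        · exact hylt
        · have : pvHash y ≤ pvHash x := (List.pairwise_cons.mp (hdrop ▸ hdropPW)).1 x hx2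
          exact lt_of_lt_of_le hylt this
    have hfilter_run : (fp :: rest).filter p = fp :: rest.takeWhile p := by
      rw [List.filter_cons_of_pos (by simp [hpdef])]
      congr 1
      conv_lhs => rw [← List.takeWhile_append_dropWhile (p := p) (l := rest)]
      rw [List.filter_append, List.filter_eq_self.mpr (fun x hx => List.mem_takeWhile_imp (p := p) hx),
        List.filter_eq_nil_iff.mpr (fun x hx => by
          simp only [hpdef, beq_iff_eq]
          exact fun he => absurd he (hr x hx).ne'), List.append_nil]
    have hnotmem : pvHash fp ∉ PySem.Set.ofList ((rest.dropWhile p).map pvHash) := by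
      rw [PySem.Set.mem_ofList]
      intro hmem
      rcases List.mem_map.mp hmem with ⟨x, hx, he⟩
      exact absurd he (hr x hx).ne'
    have hperm : (PySem.Set.ofList ((fp :: rest).map pvHash)).Perm
        (pvHash fp :: PySem.Set.ofList ((rest.dropWhile p).map pvHash)) := by
      rw [List.perm_ext_iff_of_nodup (PySem.Set.nodup_ofList _)
        (List.nodup_cons.mpr ⟨hnotmem, PySem.Set.nodup_ofList _⟩)]
      intro a
      simp only [PySem.Set.mem_ofList, List.mem_cons, List.mem_map, List.map_cons]
      constructor
      · rintro (rfl | ⟨x, hx, rfl⟩)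
        · exact Or.inl rfl
        · conv at hx => rw [← List.takeWhile_append_dropWhile (p := p) (l := rest)]
          rcases List.mem_append.mp hx with hx1 | hx2
          · exact Or.inl (ht x hx1)
          · exact Or.inr ⟨x, hx2, rfl⟩
      · rintro (rfl | ⟨x, hx, rfl⟩)
        · exact Or.inl rfl
        · exact Or.inr ⟨x, (List.dropWhile_sublist p).mem hx, rfl⟩
    -- evaluate the reference sum along the permutation
    have hsum : pvR (PySem.Set.ofList ((fp :: rest).map pvHash)) (fp :: rest)
        = pvW ((fp :: rest).filter p)
          + pvR (PySem.Set.ofList ((rest.dropWhile p).map pvHash)) (rest.dropWhile p) := by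
      unfold pvR
      rw [(hperm.map _).sum_eq, List.map_cons, List.sum_cons]
      congr 1
      apply congrArg
      apply List.map_congr_left
      intro h' hh'
      rw [PySem.Set.mem_ofList] at hh'
      rcases List.mem_map.mp hh' with ⟨x, hx, rfl⟩
      have hne : pvHash fp ≠ pvHash x := ne_of_lt (hr x hx)
      apply congrArg
      rw [List.filter_cons_of_neg (by simpa using hne)]
      conv_lhs => rw [← List.takeWhile_append_dropWhile (p := p) (l := rest)]
      rw [List.filter_append, List.filter_eq_nil_iff.mpr (fun y hy => by
        simp only [beq_iff_eq]
        intro he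
        exact hne ((ht y hy) ▸ he)), List.nil_append]
    rw [hsum, hfilter_run, ← ih hdropPW]
    show pvScan (fp :: rest) = _
    rw [pvScan]
    simp only [pvW, hpdef]

theorem pvB_eq (L : List (List (String × String))) :
    count_cross_file_similar_pairs_py_alt L = pvR (PySem.Set.ofList (L.map pvHash)) L := by
  unfold count_cross_file_similar_pairs_py_alt
  set M := PySem.List.sorted L pvHash with hM
  have hperm : M.Perm L := PySem.List.sorted_perm L pvHash false
  rw [pvScan_eq M (PySem.List.sorted_pairwise L pvHash)]
  have hfun : ∀ h', pvW (M.filter (fun fp => pvHash fp == h'))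
      = pvW (L.filter (fun fp => pvHash fp == h')) :=
    fun h' => pvW_perm (hperm.filter _)
  have hsets : (PySem.Set.ofList (M.map pvHash)).Perm (PySem.Set.ofList (L.map pvHash)) := by
    rw [List.perm_ext_iff_of_nodup (PySem.Set.nodup_ofList _) (PySem.Set.nodup_ofList _)]
    intro a
    simp only [PySem.Set.mem_ofList]
    exact (hperm.map pvHash).mem_iff
  unfold pvR
  calc ((PySem.Set.ofList (M.map pvHash)).map
          (fun h => pvW (M.filter (fun fp => pvHash fp == h)))).sum
      = ((PySem.Set.ofList (M.map pvHash)).map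
          (fun h => pvW (L.filter (fun fp => pvHash fp == h)))).sum := by
        rw [List.map_congr_left (fun h _ => hfun h)]
    _ = ((PySem.Set.ofList (L.map pvHash)).map
          (fun h => pvW (L.filter (fun fp => pvHash fp == h)))).sum := (hsets.map _).sum_eq

-- ===== VERDICT (by name: the statement is the Claim_ definition above) =====
theorem count_cross_file_similar_pairs_py_spec : Claim_equal_count_cross_file_similar_pairs_py := by
  intro L _ _
  unfold Spec_count_cross_file_similar_pairs_py
  rw [pvA_eq, pvB_eq]
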